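-- pv_equiv track=rewrite | github.com/NanNanDong/PythonTest | daydayup/滑动窗口/1208.py | equalSubstring1
-- ===== SOURCE A (Python) =====
-- def equalSubstring1(s: str, t: str, maxCost: int) -> int:
--     # 求连续子数组的 sum, 且 sum <= maxCost, 找子数组的最大长度
--     # 使用滑动窗口求解即可
--     n = len(s)
--     start = end = sumCost = 0
--     for end in range(n):
--         sumCost += abs((ord(s[end]) - ord(t[end])))
--         if sumCost > maxCost:
--             sumCost -= abs(ord(s[start]) - ord(t[start]))
--             start += 1
--
--     return n - start
-- ===== SOURCE B (Python) =====
-- def equalSubstring1(s: str, t: str, maxCost: int) -> int: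
--     # Prefix sums of per-index costs + per-end binary search for the smallest
--     # feasible start, instead of a sliding window.
--     costs = [abs(ord(a) - ord(b)) for a, b in zip(s, t)]
--     P = [0]
--     for x in costs:
--         P.append(P[-1] + x)
--     best = 0
--     for e in range(len(costs)):
--         target = P[e + 1] - maxCost
--         lo, hi = 0, e + 2
--         while lo < hi:
--             mid = (lo + hi) // 2
--             if P[mid] < target:
--                 lo = mid + 1
--             else:
--                 hi = mid
--         best = max(best, e + 1 - lo)
--     return best
-- ===== Notes on version B (the rewrite author's own statement) =====
-- stated objective: alternative
-- what changed: Replaces A's one-pass sliding window (a moving start pointer with an incrementally updated window sum) by a precomputed prefix-sum table with a per-end binary search for the smallest feasible start, taking the running maximum of the window lengths.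
import Mathlib
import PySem

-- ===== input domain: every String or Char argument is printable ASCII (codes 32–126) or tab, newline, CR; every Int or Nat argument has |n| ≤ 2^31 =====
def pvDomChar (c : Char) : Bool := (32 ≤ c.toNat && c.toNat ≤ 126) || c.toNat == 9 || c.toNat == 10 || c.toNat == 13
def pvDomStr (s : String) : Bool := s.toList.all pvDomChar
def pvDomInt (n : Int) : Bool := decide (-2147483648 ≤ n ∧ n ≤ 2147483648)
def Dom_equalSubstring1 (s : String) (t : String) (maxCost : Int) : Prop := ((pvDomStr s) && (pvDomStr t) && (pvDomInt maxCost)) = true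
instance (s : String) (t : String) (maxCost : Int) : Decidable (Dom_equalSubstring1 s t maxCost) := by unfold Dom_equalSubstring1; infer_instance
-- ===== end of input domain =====

-- B replaces A's sliding window by prefix sums with a per-end binary search for the
-- smallest feasible start (objective: alternative decomposition; not claimed faster).


-- ===== PORT A =====
-- ord(s[i]) ; the `.getD ' '` default is never reached inside Pre_ (every index used is in range)
def pvOrdAt (s : String) (i : Int) : Int := (((PySem.Str.pyGet? s i).getD ' ').toNat : Int)

def equalSubstring1 (s : String) (t : String) (maxCost : Int) : Int :=
  let n : Int := PySem.Str.len s
  let st := (PySem.List.pyRange 0 n).foldl (fun (st : Int × Int) (e : Int) =>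
      let sum1 := st.2 + |pvOrdAt s e - pvOrdAt t e|
      if sum1 > maxCost then (st.1 + 1, sum1 - |pvOrdAt s st.1 - pvOrdAt t st.1|)
      else (st.1, sum1)) (0, 0)
  n - st.1

-- ===== PORT B =====
-- costs = [abs(ord(a) - ord(b)) for a, b in zip(s, t)]
def pvCosts (s : String) (t : String) : List Int :=
  (s.toList.zip t.toList).map (fun p => |((p.1.toNat : Int)) - ((p.2.toNat : Int))|)

-- the hand-written `while lo < hi` binary-search loop of Source B, step for step;
-- the Nat argument is fuel (= hi - lo at the call, the loop's own variant), only there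
-- to make the loop structurally recursive: it never runs out on the actual calls.
def pvBisectGo (P : List Int) (target : Int) : Nat → Int → Int → Int
  | 0, lo, _ => lo
  | fuel + 1, lo, hi =>
    if lo < hi then
      if PySem.List.pyGetD P (PySem.Int.floordiv (lo + hi) 2) 0 < target then
        pvBisectGo P target fuel (PySem.Int.floordiv (lo + hi) 2 + 1) hi
      else
        pvBisectGo P target fuel lo (PySem.Int.floordiv (lo + hi) 2)
    else lo

def pvBisect (P : List Int) (target : Int) (lo hi : Int) : Int :=
  pvBisectGo P target (hi - lo).toNat lo hi

def equalSubstring1_alt (s : String) (t : String) (maxCost : Int) : Int :=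
  let costs := pvCosts s t
  let P := costs.foldl (fun P x => P ++ [PySem.List.pyGetD P (-1) 0 + x]) [0]
  (PySem.List.pyRange 0 (costs.length : Int)).foldl (fun best e =>
      let target := PySem.List.pyGetD P (e + 1) 0 - maxCost
      let lo := pvBisect P target 0 (e + 2)
      max best (e + 1 - lo)) 0

-- ===== PRECONDITION & SPEC =====
-- Pre_ excludes exactly the inputs with len(t) < len(s), on which A raises IndexError at t[end].
def Pre_equalSubstring1 (s : String) (t : String) (maxCost : Int) : Prop :=
  s.toList.length ≤ t.toList.length
instance (s : String) (t : String) (maxCost : Int) : Decidable (Pre_equalSubstring1 s t maxCost) := by unfold Pre_equalSubstring1; infer_instance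

def pvWitness_equalSubstring1 : String × String × Int := ("abc", "axc", 1)

def Spec_equalSubstring1 (s : String) (t : String) (maxCost : Int) (out : Int) : Prop := out = equalSubstring1_alt s t maxCost
instance (s : String) (t : String) (maxCost : Int) (out : Int) : Decidable (Spec_equalSubstring1 s t maxCost out) := by unfold Spec_equalSubstring1; infer_instance

-- ===== CLAIM (what is proved, stated in full; the proofs are below) =====
def Claim_equal_equalSubstring1 : Prop := ∀ (s : String) (t : String) (maxCost : Int), Dom_equalSubstring1 s t maxCost → Pre_equalSubstring1 s t maxCost → Spec_equalSubstring1 s t maxCost (equalSubstring1 s t maxCost)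

-- ===== LEMMAS AND PROOFS =====

-- prefix sums of the cost list
def pvP (c : List Int) (k : Nat) : Int := (c.take k).sum

-- A's loop on the cost list, in Nat/Int state (start, sumCost), after k steps
def pvALoop (c : List Int) (mc : Int) : Nat → Nat × Int
  | 0 => (0, 0)
  | k + 1 =>
    let st := pvALoop c mc k
    let sum1 := st.2 + c.getD k 0
    if sum1 > mc then (st.1 + 1, sum1 - c.getD st.1 0) else (st.1, sum1)

-- least feasible start for the window ending at e+1, as a count of infeasible prefixes
def pvLow (c : List Int) (mc : Int) (e : Nat) : Nat :=
  (List.range (e + 2)).countP (fun j => decide (pvP c j < pvP c (e + 1) - mc))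

-- B's running maximum after k ends
def pvBest (c : List Int) (mc : Int) : Nat → Int
  | 0 => 0
  | k + 1 => max (pvBest c mc k) ((k : Int) + 1 - (pvLow c mc k : Int))

-- the incremental prefix-sum list Source B builds
def pvAcc (a : Int) : List Int → List Int
  | [] => []
  | x :: xs => (a + x) :: pvAcc (a + x) xs

-- ---- prefix sums ----
lemma pvP_zero (c : List Int) : pvP c 0 = 0 := rfl

lemma pvP_succ (c : List Int) (k : Nat) (h : k < c.length) :
    pvP c (k + 1) = pvP c k + c.getD k 0 := by
  unfold pvP
  rw [List.take_add_one, List.sum_append, List.getD_eq_getElem _ _ h]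
  simp [h]

lemma pvP_le_succ (c : List Int) (hc : ∀ x ∈ c, 0 ≤ x) (k : Nat) :
    pvP c k ≤ pvP c (k + 1) := by
  by_cases h : k < c.length
  · have hmem : c.getD k 0 ∈ c := by
      rw [List.getD_eq_getElem _ _ h]; exact List.getElem_mem h
    have := hc _ hmem
    rw [pvP_succ c k h]; omega
  · unfold pvP
    rw [List.take_of_length_le (by omega), List.take_of_length_le (by omega)]

lemma pvP_mono (c : List Int) (hc : ∀ x ∈ c, 0 ≤ x) {i j : Nat} (h : i ≤ j) :
    pvP c i ≤ pvP c j := by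
  induction j with
  | zero => have : i = 0 := by omega
            subst this; rfl
  | succ j ih =>
    rcases Nat.lt_or_ge i (j + 1) with hij | hij
    · exact le_trans (ih (by omega)) (pvP_le_succ c hc j)
    · have : i = j + 1 := by omega
      subst this; rfl

-- ---- countP over an initial segment ----
lemma cnt_initial (p : Nat → Bool) (n : Nat) : ∀ (r : Nat), r ≤ n →
    (∀ j, j < r → p j) → (∀ j, r ≤ j → j < n → ¬ p j) →
    (List.range n).countP p = r := by
  induction n with
  | zero => intro r hr _ _; simp [(by omega : r = 0)]
  | succ n ih =>
    intro r hr h1 h2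
    rw [List.range_succ, List.countP_append]
    rcases Nat.lt_or_ge r (n + 1) with hlt | hge
    · have hrn : r ≤ n := by omega
      rw [ih r hrn h1 (fun j hj hjn => h2 j hj (by omega))]
      have : ¬ p n := h2 n hrn (by omega)
      simp [this]
    · have hr1 : r = n + 1 := by omega
      subst hr1
      have hpn : p n := h1 n (by omega)
      rw [ih n le_rfl (fun j hj => h1 j (by omega)) (fun j hj hjn => absurd hjn (by omega))]
      simp [hpn]

lemma cnt_lower (p : Nat → Bool) (n r : Nat) (hr : r ≤ n)
    (h1 : ∀ j, j < r → p j) : r ≤ (List.range n).countP p := by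
  calc r = (List.range r).countP p := by
            rw [cnt_initial p r r le_rfl h1 (fun j hj hjn => absurd hjn (by omega))]
       _ ≤ (List.range n).countP p := by
            have : List.range n = List.range r ++ (List.range' r (n - r)) := by
              rw [List.range_eq_range', List.range_eq_range', (by omega : n = r + (n - r))]
              have h := @List.range'_append 0 r (n - r) 1
              simpa using h.symm
            rw [this, List.countP_append]; omega

-- ---- the heart: A's loop state vs B's running maximum ----
theorem pvALoop_inv (c : List Int) (mc : Int) (hc : ∀ x ∈ c, 0 ≤ x) :
    ∀ k, k ≤ c.length →
      (pvALoop c mc k).1 ≤ k ∧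
      (pvALoop c mc k).2 = pvP c k - pvP c ((pvALoop c mc k).1) ∧
      (∀ i, i < (pvALoop c mc k).1 → mc < pvP c k - pvP c i) ∧
      ((k : Int) - ((pvALoop c mc k).1 : Int) = pvBest c mc k) := by
  intro k
  induction k with
  | zero => intro _; refine ⟨le_rfl, by simp [pvALoop], by simp [pvALoop], by simp [pvALoop, pvBest]⟩
  | succ k ih =>
    intro hk1
    obtain ⟨i1, i2, i3, i4⟩ := ih (by omega)
    set st := pvALoop c mc k with hst
    have hklen : k < c.length := by omega
    have hsum1 : st.2 + c.getD k 0 = pvP c (k + 1) - pvP c st.1 := by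
      rw [i2, pvP_succ c k hklen]; ring
    have hmonoP : ∀ {i j : Nat}, i ≤ j → pvP c i ≤ pvP c j := fun h => pvP_mono c hc h
    have hbest : pvBest c mc (k + 1) = max (pvBest c mc k) ((k : Int) + 1 - (pvLow c mc k : Int)) := rfl
    by_cases hbr : st.2 + c.getD k 0 > mc
    · -- advance branch
      have hA : pvALoop c mc (k + 1) = (st.1 + 1, st.2 + c.getD k 0 - c.getD st.1 0) := by
        simp only [pvALoop, ← hst]
        rw [if_pos hbr]
      have hstlen : st.1 < c.length := by omega
      have hlow : st.1 + 1 ≤ pvLow c mc k := by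
        apply cnt_lower _ _ _ (by omega)
        intro j hj
        rcases Nat.lt_or_ge j st.1 with hjs | hjs
        · have := i3 j hjs
          have := hmonoP (show k ≤ k + 1 by omega)
          simp only [decide_eq_true_eq]; omega
        · have hj' : j = st.1 := by omega
          subst hj'
          simp only [decide_eq_true_eq]; omega
      refine ⟨by rw [hA]; omega, ?_, ?_, ?_⟩
      · rw [hA, hsum1, pvP_succ c st.1 hstlen]; ring
      · rw [hA]
        intro i hi
        rcases Nat.lt_or_ge i st.1 with his | his
        · have := i3 i his
          have := hmonoP (show k ≤ k + 1 by omega)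
          omega
        · have hi' : i = st.1 := by omega
          subst hi'; omega
      · rw [hA, hbest, ← i4]
        have : (k : Int) + 1 - (pvLow c mc k : Int) ≤ (k : Int) - (st.1 : Int) := by
          have : (st.1 : Int) + 1 ≤ (pvLow c mc k : Int) := by exact_mod_cast hlow
          omega
        rw [max_eq_left this]
        push_cast; ring
    · -- keep branch
      have hA : pvALoop c mc (k + 1) = (st.1, st.2 + c.getD k 0) := by
        simp only [pvALoop, ← hst]
        rw [if_neg hbr]
      have hlow : pvLow c mc k = st.1 := by
        apply cnt_initial _ _ _ (by omega)
        · intro j hj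
          have := i3 j hj
          have := hmonoP (show k ≤ k + 1 by omega)
          simp only [decide_eq_true_eq]; omega
        · intro j hj _
          have := hmonoP hj
          simp only [decide_eq_true_eq]; omega
      refine ⟨by rw [hA]; omega, by rw [hA]; exact hsum1, ?_, ?_⟩
      · rw [hA]
        intro i hi
        have := i3 i hi
        have := hmonoP (show k ≤ k + 1 by omega)
        omega
      · rw [hA, hbest, hlow, ← i4]
        rw [max_eq_right (by omega)]
        push_cast; ring

-- ---- bridging port A to pvALoop ----
lemma pvALoop_fst_le (c : List Int) (mc : Int) : ∀ k, (pvALoop c mc k).1 ≤ k := by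
  intro k
  induction k with
  | zero => simp [pvALoop]
  | succ k ih =>
    simp only [pvALoop]
    split <;> simp <;> omega

lemma pvCosts_length (s t : String) (hpre : s.toList.length ≤ t.toList.length) :
    (pvCosts s t).length = s.toList.length := by
  unfold pvCosts
  rw [List.length_map, List.length_zip]; omega

lemma pvCosts_nonneg (s t : String) : ∀ x ∈ pvCosts s t, 0 ≤ x := by
  intro x hx
  simp only [pvCosts, List.mem_map] at hx
  obtain ⟨p, _, rfl⟩ := hx
  exact abs_nonneg _

lemma pvCostAt (s t : String) (hpre : s.toList.length ≤ t.toList.length)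
    (j : Nat) (hj : j < s.toList.length) :
    |pvOrdAt s (j : Int) - pvOrdAt t (j : Int)| = (pvCosts s t).getD j 0 := by
  have hjt : j < t.toList.length := by omega
  have hjc : j < (pvCosts s t).length := by rw [pvCosts_length s t hpre]; exact hj
  rw [List.getD_eq_getElem _ _ hjc]
  simp only [pvCosts, List.getElem_map, List.getElem_zip]
  simp only [pvOrdAt, PySem.Str.pyGet?_natCast]
  rw [List.getElem?_eq_getElem hj, List.getElem?_eq_getElem hjt]
  simp

lemma portA_eq (s t : String) (mc : Int) (hpre : s.toList.length ≤ t.toList.length) :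
    equalSubstring1 s t mc =
      (s.toList.length : Int) - ((pvALoop (pvCosts s t) mc s.toList.length).1 : Int) := by
  unfold equalSubstring1
  simp only [PySem.Str.len_eq, PySem.List.pyRange_zero_nat, List.foldl_map]
  have key : ∀ k, k ≤ s.toList.length →
      (List.range k).foldl (fun (st : Int × Int) (e : Nat) =>
        let sum1 := st.2 + |pvOrdAt s (e : Int) - pvOrdAt t (e : Int)|
        if sum1 > mc then (st.1 + 1, sum1 - |pvOrdAt s st.1 - pvOrdAt t st.1|)
        else (st.1, sum1)) (0, 0) =
      (((pvALoop (pvCosts s t) mc k).1 : Int), (pvALoop (pvCosts s t) mc k).2) := by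
    intro k
    induction k with
    | zero => intro _; simp [pvALoop]
    | succ k ih =>
      intro hk
      rw [List.range_succ, List.foldl_append, ih (by omega)]
      simp only [List.foldl_cons, List.foldl_nil]
      have hstle := pvALoop_fst_le (pvCosts s t) mc k
      have hck := pvCostAt s t hpre k (by omega)
      have hcst := pvCostAt s t hpre (pvALoop (pvCosts s t) mc k).1 (by omega)
      simp only [pvALoop]
      rw [hck, hcst]
      split <;> simp
  have := key s.toList.length le_rfl
  simp only [this]

-- ---- the prefix-sum list Source B builds ----
lemma pvP_cons (x : Int) (xs : List Int) (k : Nat) : pvP (x :: xs) (k + 1) = x + pvP xs k := by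
  unfold pvP
  simp

lemma pvAcc_length (a : Int) (c : List Int) : (pvAcc a c).length = c.length := by
  induction c generalizing a with
  | nil => rfl
  | cons x xs ih => simp [pvAcc, ih]

lemma pvAcc_getD (c : List Int) : ∀ (a : Int) (j : Nat), j < c.length →
    (pvAcc a c).getD j 0 = a + pvP c (j + 1) := by
  induction c with
  | nil => intro a j hj; simp at hj
  | cons x xs ih =>
    intro a j hj
    cases j with
    | zero => simp [pvAcc, pvP_cons, pvP_zero]
    | succ j =>
      simp only [pvAcc, List.getD_cons_succ]
      rw [ih (a + x) j (by simpa using hj), pvP_cons]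
      ring

lemma pvFoldP : ∀ (c : List Int) (P0 : List Int) (h : P0 ≠ []),
    c.foldl (fun P x => P ++ [PySem.List.pyGetD P (-1) 0 + x]) P0
      = P0 ++ pvAcc (P0.getLast h) c := by
  intro c
  induction c with
  | nil => intro P0 h; simp [pvAcc]
  | cons x xs ih =>
    intro P0 h
    simp only [List.foldl_cons]
    rw [PySem.List.pyGetD_neg_one P0 0 h]
    rw [ih (P0 ++ [P0.getLast h + x]) (by simp)]
    rw [List.getLast_concat]
    simp [pvAcc]

lemma pvPl_getD (c : List Int) : ∀ j, j ≤ c.length →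
    ((0 : Int) :: pvAcc 0 c).getD j 0 = pvP c j := by
  intro j hj
  cases j with
  | zero => simp [pvP_zero]
  | succ j =>
    simp only [List.getD_cons_succ]
    rw [pvAcc_getD c 0 j (by omega)]
    ring

-- ---- correctness of the hand-written binary search ----
lemma pvBisectGo_spec (Pl : List Int) (target : Int)
    (Hmono : ∀ i j : Nat, i ≤ j → j < Pl.length → Pl.getD i 0 ≤ Pl.getD j 0) :
    ∀ (fuel : Nat) (lo hi : Int), (hi - lo).toNat ≤ fuel → 0 ≤ lo → lo ≤ hi → hi ≤ (Pl.length : Int) →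
    (∀ j : Nat, (j : Int) < lo → Pl.getD j 0 < target) →
    lo ≤ pvBisectGo Pl target fuel lo hi ∧ pvBisectGo Pl target fuel lo hi ≤ hi ∧
    (∀ j : Nat, (j : Int) < pvBisectGo Pl target fuel lo hi → Pl.getD j 0 < target) ∧
    (∀ j : Nat, pvBisectGo Pl target fuel lo hi ≤ (j : Int) → (j : Int) < hi → ¬ Pl.getD j 0 < target) := by
  intro fuel
  induction fuel with
  | zero =>
    intro lo hi hfuel h0 hlh hlen Hlow
    have : hi = lo := by omega
    subst this
    exact ⟨le_rfl, le_rfl, Hlow, fun j h1 h2 => absurd (lt_of_le_of_lt h1 h2) (lt_irrefl _)⟩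
  | succ fuel ih =>
    intro lo hi hfuel h0 hlh hlen Hlow
    simp only [pvBisectGo]
    by_cases hlt : lo < hi
    · rw [if_pos hlt]
      have hmid : PySem.Int.floordiv (lo + hi) 2 = (lo + hi) / 2 :=
        PySem.Int.floordiv_eq_ediv_of_pos (by norm_num)
      rw [hmid]
      set mid : Int := (lo + hi) / 2 with hmiddef
      have hmlo : lo ≤ mid := by omega
      have hmhi : mid < hi := by omega
      have hmlen : mid < (Pl.length : Int) := by omega
      have hmnn : 0 ≤ mid := by omega
      have hgetm : PySem.List.pyGetD Pl mid 0 = Pl.getD mid.toNat 0 := by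
        rw [PySem.List.pyGetD_eq_getElem Pl 0 hmnn (by exact_mod_cast hmlen)]
        rw [List.getD_eq_getElem _ _ (by omega)]
      by_cases hcmp : PySem.List.pyGetD Pl mid 0 < target
      · rw [if_pos hcmp]
        have Hlow' : ∀ j : Nat, (j : Int) < mid + 1 → Pl.getD j 0 < target := by
          intro j hjm
          rcases lt_or_ge (j : Int) lo with hjlo | hjlo
          · exact Hlow j hjlo
          · have hle : j ≤ mid.toNat := by omega
            have := Hmono j mid.toNat hle (by omega)
            rw [hgetm] at hcmp
            omega
        obtain ⟨c1, c2, c3, c4⟩ := ih (mid + 1) hi (by omega) (by omega) (by omega) hlen Hlow'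
        exact ⟨le_trans (by omega) c1, c2, c3, c4⟩
      · rw [if_neg hcmp]
        obtain ⟨c1, c2, c3, c4⟩ := ih lo mid (by omega) h0 (by omega) (by omega) Hlow
        refine ⟨c1, by omega, c3, ?_⟩
        intro j hj1 hj2
        rcases lt_or_ge (j : Int) mid with hjm | hjm
        · exact c4 j hj1 hjm
        · have := Hmono mid.toNat j (by omega) (by omega)
          rw [hgetm] at hcmp
          omega
    · rw [if_neg hlt]
      exact ⟨le_rfl, hlh, Hlow, fun j h1 h2 => by omega⟩

lemma pvBisect_eq_low (c : List Int) (hc : ∀ x ∈ c, 0 ≤ x) (mc : Int) (e : Nat) (he : e < c.length) :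
    pvBisect ((0 : Int) :: pvAcc 0 c) (pvP c (e + 1) - mc) 0 ((e : Int) + 2) = ((pvLow c mc e : Nat) : Int) := by
  have hlen : ((0 : Int) :: pvAcc 0 c).length = c.length + 1 := by simp [pvAcc_length]
  have Hmono : ∀ i j : Nat, i ≤ j → j < ((0 : Int) :: pvAcc 0 c).length →
      ((0 : Int) :: pvAcc 0 c).getD i 0 ≤ ((0 : Int) :: pvAcc 0 c).getD j 0 := by
    intro i j hij hjl
    rw [hlen] at hjl
    rw [pvPl_getD c i (by omega), pvPl_getD c j (by omega)]
    exact pvP_mono c hc hij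
  obtain ⟨c1, c2, c3, c4⟩ := pvBisectGo_spec ((0 : Int) :: pvAcc 0 c) (pvP c (e + 1) - mc) Hmono
    (((e : Int) + 2 - 0).toNat) 0 ((e : Int) + 2) le_rfl le_rfl (by omega)
    (by rw [hlen]; omega) (fun j hj => absurd hj (by omega))
  unfold pvBisect
  set r : Int := pvBisectGo ((0 : Int) :: pvAcc 0 c) (pvP c (e + 1) - mc) (((e : Int) + 2 - 0).toNat) 0 ((e : Int) + 2) with hrdef
  have hr0 : 0 ≤ r := c1
  have hre : r ≤ (e : Int) + 2 := c2
  have hlow : pvLow c mc e = r.toNat := by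
    unfold pvLow
    apply cnt_initial _ _ _ (by omega)
    · intro j hj
      have hj' : (j : Int) < r := by omega
      have := c3 j hj'
      rw [pvPl_getD c j (by omega)] at this
      simp only [decide_eq_true_eq]; omega
    · intro j hj1 hj2
      have := c4 j (by omega) (by omega)
      rw [pvPl_getD c j (by omega)] at this
      simp only [decide_eq_true_eq]; omega
  rw [hlow]
  omega

-- ---- bridging port B to pvBest ----
lemma portB_eq (s t : String) (mc : Int) :
    equalSubstring1_alt s t mc = pvBest (pvCosts s t) mc (pvCosts s t).length := by
  have hc := pvCosts_nonneg s t
  unfold equalSubstring1_alt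
  simp only [pvFoldP (pvCosts s t) [(0 : Int)] (by simp), List.getLast_singleton,
    List.singleton_append, PySem.List.pyRange_zero_nat, List.foldl_map]
  have key : ∀ k, k ≤ (pvCosts s t).length →
      (List.range k).foldl (fun (best : Int) (e : Nat) =>
        let target := PySem.List.pyGetD ((0 : Int) :: pvAcc 0 (pvCosts s t)) ((e : Int) + 1) 0 - mc
        let lo := pvBisect ((0 : Int) :: pvAcc 0 (pvCosts s t)) target 0 ((e : Int) + 2)
        max best ((e : Int) + 1 - lo)) 0 = pvBest (pvCosts s t) mc k := by
    intro k
    induction k with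
    | zero => intro _; rfl
    | succ k ih =>
      intro hk
      rw [List.range_succ, List.foldl_append, ih (by omega)]
      simp only [List.foldl_cons, List.foldl_nil]
      have htgt : PySem.List.pyGetD ((0 : Int) :: pvAcc 0 (pvCosts s t)) ((k : Int) + 1) 0
          = pvP (pvCosts s t) (k + 1) := by
        have : ((k : Int) + 1) = ((k + 1 : Nat) : Int) := by push_cast; ring
        rw [this, PySem.List.pyGetD_natCast, pvPl_getD (pvCosts s t) (k + 1) (by omega)]
      rw [htgt, pvBisect_eq_low (pvCosts s t) hc mc k (by omega)]
      rfl
  exact key (pvCosts s t).length le_rfl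

theorem equalSubstring1_spec : Claim_equal_equalSubstring1 := by
  intro s t mc hdom hpre
  unfold Pre_equalSubstring1 at hpre
  unfold Spec_equalSubstring1
  rw [portA_eq s t mc hpre, portB_eq s t mc]
  have hlen := pvCosts_length s t hpre
  obtain ⟨_, _, _, i4⟩ := pvALoop_inv (pvCosts s t) mc (pvCosts_nonneg s t) (pvCosts s t).length le_rfl
  rw [← hlen]
  exact i4
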